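-- pv_equiv track=rewrite | github.com/DiscoveryPiscine42Bkk/discovery-piscine-introduction-to-python-PhooPwintChoThar | rush/ex00/checkmate.py | bishopCaptures
-- ===== SOURCE A (Python) =====
-- def bishopCaptures(bishop, king, board):
--     size = len(board)
--     row, col = bishop
--     directions = [(-1, -1), (-1, 1), (1, -1), (1, 1)]
--     for dr, dc in directions:
--         r, c = row + dr, col + dc
--         while 0 <= r < size and 0 <= c < size:
--             if board[r][c] != '.':
--                 if (r, c) == king:
--                     return True
--                 break
--             if (r, c) == king:
--                 return True
--             r += dr
--             c += dc
--     return False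
-- ===== SOURCE B (Python) =====
-- def bishopCaptures(bishop, king, board):
--     size = len(board)
--     row, col = bishop
--     kr, kc = king
--     if not (0 <= kr < size and 0 <= kc < size):
--         return False
--     if (kr, kc) == (row, col):
--         return False
--     if abs(kr - row) != abs(kc - col):
--         return False
--     dr = 1 if kr > row else -1
--     dc = 1 if kc > col else -1
--     for k in range(1, abs(kr - row)):
--         r, c = row + k * dr, col + k * dc
--         if not (0 <= r < size and 0 <= c < size):
--             return False
--         if board[r][c] != '.':
--             return False
--     return True
-- ===== Notes on version B (the rewrite author's own statement) =====
-- stated objective: simpler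
-- what changed: Instead of walking outward along all four diagonals, B first decides by geometry whether the king sits on a bishop diagonal inside the board and then scans only the single segment of squares strictly between bishop and king (validating each square) for obstructions.
-- outside the precondition, e.g. on bishopCaptures((0, 0), (9, 9), ['...', '.#.', '..']): A returns False, B returns False
import Mathlib
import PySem

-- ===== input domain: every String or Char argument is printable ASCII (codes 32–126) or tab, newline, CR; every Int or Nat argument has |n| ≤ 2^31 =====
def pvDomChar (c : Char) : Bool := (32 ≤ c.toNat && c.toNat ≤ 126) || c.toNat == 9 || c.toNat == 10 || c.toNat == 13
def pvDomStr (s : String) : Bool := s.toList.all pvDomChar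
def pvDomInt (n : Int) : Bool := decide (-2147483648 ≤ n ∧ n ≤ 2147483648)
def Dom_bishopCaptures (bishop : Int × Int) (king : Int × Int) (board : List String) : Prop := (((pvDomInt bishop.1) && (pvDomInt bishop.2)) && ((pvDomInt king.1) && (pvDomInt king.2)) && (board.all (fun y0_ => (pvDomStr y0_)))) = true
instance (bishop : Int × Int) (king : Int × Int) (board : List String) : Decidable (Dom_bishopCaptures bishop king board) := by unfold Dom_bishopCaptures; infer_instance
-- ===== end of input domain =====

-- B replaces A's outward walk along all four diagonals by one geometric test (king on a
-- diagonal, inside the board) followed by a scan of the single segment of squares strictly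
-- between bishop and king; objective: simpler.

-- ===== PORT A =====
-- board[r][c]; exact under Pre_ (both indices are then in range, so the default is never used)
def pvCell (board : List String) (r c : Int) : Char :=
  ((PySem.List.pyGet? board r).bind (fun s => PySem.Str.pyGet? s c)).getD '.'

-- A's inner while loop; fuel size+1 is enough: r moves by ±1 each step and stays in [0,size)
def pvWalkA (board : List String) (size : Int) (king : Int × Int) (dr dc : Int) :
    Nat → Int → Int → Bool
  | 0, _, _ => false
  | fuel+1, r, c =>
    if 0 ≤ r ∧ r < size ∧ 0 ≤ c ∧ c < size then
      if pvCell board r c ≠ '.' then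
        decide ((r, c) = king)
      else if (r, c) = king then true
      else pvWalkA board size king dr dc fuel (r + dr) (c + dc)
    else false

def bishopCaptures (bishop : Int × Int) (king : Int × Int) (board : List String) : Bool :=
  let size : Int := board.length
  [((-1 : Int), (-1 : Int)), (-1, 1), (1, -1), (1, 1)].any fun d =>
    pvWalkA board size king d.1 d.2 (size.toNat + 1) (bishop.1 + d.1) (bishop.2 + d.2)

-- ===== PORT B =====
def bishopCaptures_alt (bishop : Int × Int) (king : Int × Int) (board : List String) : Bool :=
  let size : Int := board.length
  let row := bishop.1; let col := bishop.2
  let kr := king.1; let kc := king.2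
  if ¬ (0 ≤ kr ∧ kr < size ∧ 0 ≤ kc ∧ kc < size) then false
  else if (kr, kc) = (row, col) then false
  else if (kr - row).natAbs ≠ (kc - col).natAbs then false
  else
    let dr : Int := if row < kr then 1 else -1
    let dc : Int := if col < kc then 1 else -1
    (PySem.List.pyRange 1 ((kr - row).natAbs : Int) 1).all fun k =>
      let r := row + k * dr
      let c := col + k * dc
      decide (0 ≤ r ∧ r < size ∧ 0 ≤ c ∧ c < size) && (pvCell board r c == '.')

-- ===== PRECONDITION & SPEC =====
-- Pre_ excludes the boards on which A can raise IndexError while probing the bishop's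
-- diagonals: it requires every in-bounds square on a diagonal through the bishop to lie
-- within its row's length (a closed-form over-approximation: A may stop before reaching a
-- short row and still return, see the cite in claim.json).
def Pre_bishopCaptures (bishop : Int × Int) (king : Int × Int) (board : List String) : Prop :=
  ∀ i : Fin board.length, ∀ j : Fin board.length,
    (((i : Nat) : Int) - bishop.1).natAbs = (((j : Nat) : Int) - bishop.2).natAbs →
    ((j : Nat) : Int) < PySem.Str.len board[i]
instance (bishop : Int × Int) (king : Int × Int) (board : List String) : Decidable (Pre_bishopCaptures bishop king board) := by unfold Pre_bishopCaptures; infer_instance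

def pvWitness_bishopCaptures : (Int × Int) × (Int × Int) × List String :=
  ((0, 0), (2, 2), ["...", ".#.", "..."])

def Spec_bishopCaptures (bishop : Int × Int) (king : Int × Int) (board : List String) (out : Bool) : Prop := out = bishopCaptures_alt bishop king board
instance (bishop : Int × Int) (king : Int × Int) (board : List String) (out : Bool) : Decidable (Spec_bishopCaptures bishop king board out) := by unfold Spec_bishopCaptures; infer_instance

-- ===== CLAIM (what is proved, stated in full; the proofs are below) =====
def Claim_equal_bishopCaptures : Prop := ∀ (bishop : Int × Int) (king : Int × Int) (board : List String), Dom_bishopCaptures bishop king board → Pre_bishopCaptures bishop king board → Spec_bishopCaptures bishop king board (bishopCaptures bishop king board)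

-- ===== LEMMAS AND PROOFS =====

-- Characterisation of A's inner walk: it returns true iff the king lies k steps ahead on the
-- ray, every square visited up to (and including) the king is on the board, and every square
-- strictly before the king is '.'.
theorem pvWalkA_iff (board : List String) (size : Int) (king : Int × Int) (dr dc : Int) :
    ∀ (fuel : Nat) (r c : Int), pvWalkA board size king dr dc fuel r c = true ↔
      ∃ k : Nat, k < fuel ∧ king = (r + k * dr, c + k * dc) ∧
        (∀ j : Nat, j ≤ k → (0 ≤ r + j * dr ∧ r + j * dr < size ∧ 0 ≤ c + j * dc ∧ c + j * dc < size)) ∧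
        (∀ j : Nat, j < k → pvCell board (r + j * dr) (c + j * dc) = '.') := by
  intro fuel
  induction fuel with
  | zero =>
    intro r c
    constructor
    · intro h; exact absurd h (by simp [pvWalkA])
    · rintro ⟨k, hk, -⟩; exact absurd hk (Nat.not_lt_zero k)
  | succ fuel ih =>
    intro r c
    by_cases hb : 0 ≤ r ∧ r < size ∧ 0 ≤ c ∧ c < size
    · by_cases hc : pvCell board r c = '.'
      · by_cases hk : (r, c) = king
        · rw [pvWalkA, if_pos hb, if_neg (show ¬(pvCell board r c ≠ '.') by simp [hc]), if_pos hk]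
          constructor
          · intro _
            refine ⟨0, Nat.succ_pos _, by simpa using hk.symm, ?_, ?_⟩
            · intro j hj
              have : j = 0 := by omega
              subst this; simpa using hb
            · intro j hj; exact absurd hj (Nat.not_lt_zero j)
          · intro _; rfl
        · rw [pvWalkA, if_pos hb, if_neg (show ¬(pvCell board r c ≠ '.') by simp [hc]), if_neg hk, ih]
          constructor
          · rintro ⟨k, hkf, hke, hbnd, hdot⟩
            refine ⟨k + 1, by omega, ?_, ?_, ?_⟩
            · rw [hke]
              simp only [Prod.mk.injEq]
              push_cast
              constructor <;> ring
            · intro j hj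
              rcases Nat.eq_zero_or_pos j with h0 | h0
              · subst h0; simpa using hb
              · have h := hbnd (j - 1) (by omega)
                have e0 : ((j - 1 : Nat) : Int) = (j : Int) - 1 := by omega
                rw [e0] at h
                have e1 : r + (j : Int) * dr = r + dr + ((j : Int) - 1) * dr := by ring
                have e2 : c + (j : Int) * dc = c + dc + ((j : Int) - 1) * dc := by ring
                rw [e1, e2]; exact h
            · intro j hj
              rcases Nat.eq_zero_or_pos j with h0 | h0
              · subst h0; simpa using hc
              · have h := hdot (j - 1) (by omega)
                have e0 : ((j - 1 : Nat) : Int) = (j : Int) - 1 := by omega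
                rw [e0] at h
                have e1 : r + (j : Int) * dr = r + dr + ((j : Int) - 1) * dr := by ring
                have e2 : c + (j : Int) * dc = c + dc + ((j : Int) - 1) * dc := by ring
                rw [e1, e2]; exact h
          · rintro ⟨k, hkf, hke, hbnd, hdot⟩
            rcases Nat.eq_zero_or_pos k with h0 | h0
            · subst h0
              simp only [Nat.cast_zero, zero_mul, add_zero] at hke
              exact absurd hke.symm hk
            · refine ⟨k - 1, by omega, ?_, ?_, ?_⟩
              · rw [hke]
                simp only [Prod.mk.injEq]
                have e0 : ((k - 1 : Nat) : Int) = (k : Int) - 1 := by omega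
                rw [e0]
                constructor <;> ring
              · intro j hj
                have h := hbnd (j + 1) (by omega)
                push_cast at h
                have e1 : r + dr + (j : Int) * dr = r + ((j : Int) + 1) * dr := by ring
                have e2 : c + dc + (j : Int) * dc = c + ((j : Int) + 1) * dc := by ring
                rw [e1, e2]; exact h
              · intro j hj
                have h := hdot (j + 1) (by omega)
                push_cast at h
                have e1 : r + dr + (j : Int) * dr = r + ((j : Int) + 1) * dr := by ring
                have e2 : c + dc + (j : Int) * dc = c + ((j : Int) + 1) * dc := by ring
                rw [e1, e2]; exact h
      · rw [pvWalkA, if_pos hb, if_pos (show pvCell board r c ≠ '.' from hc), decide_eq_true_eq]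
        constructor
        · intro hk
          refine ⟨0, Nat.succ_pos _, by simpa using hk.symm, ?_, ?_⟩
          · intro j hj
            have : j = 0 := by omega
            subst this; simpa using hb
          · intro j hj; exact absurd hj (Nat.not_lt_zero j)
        · rintro ⟨k, hkf, hke, hbnd, hdot⟩
          rcases Nat.eq_zero_or_pos k with h0 | h0
          · subst h0
            simp only [Nat.cast_zero, zero_mul, add_zero] at hke
            exact hke.symm
          · exact absurd (by simpa using hdot 0 h0) hc
    · rw [pvWalkA, if_neg hb]
      constructor
      · intro h; exact absurd h (by simp)
      · rintro ⟨k, hkf, hke, hbnd, hdot⟩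
        exact absurd (by simpa using hbnd 0 (Nat.zero_le k)) hb

-- What a successful walk of A implies: the king sits m ≥ 1 steps along the ray, is on the
-- board, and every square strictly between is on the board and '.'.
theorem walk_segment_of (board : List String) (size row col kr kc d1 d2 : Int) (fuel : Nat)
    (h : pvWalkA board size (kr, kc) d1 d2 fuel (row + d1) (col + d2) = true) :
    ∃ m : Nat, 1 ≤ m ∧ kr = row + m * d1 ∧ kc = col + m * d2 ∧
      (0 ≤ kr ∧ kr < size ∧ 0 ≤ kc ∧ kc < size) ∧
      ∀ x : Int, 1 ≤ x → x < m →
        (0 ≤ row + x * d1 ∧ row + x * d1 < size ∧ 0 ≤ col + x * d2 ∧ col + x * d2 < size) ∧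
        pvCell board (row + x * d1) (col + x * d2) = '.' := by
  rw [pvWalkA_iff] at h
  obtain ⟨k, hkf, hke, hbnd, hdot⟩ := h
  simp only [Prod.mk.injEq] at hke
  refine ⟨k + 1, by omega, ?_, ?_, ?_, ?_⟩
  · rw [hke.1]; push_cast; ring
  · rw [hke.2]; push_cast; ring
  · have h := hbnd k le_rfl
    rw [← hke.1, ← hke.2] at h
    exact h
  · intro x hx1 hx2
    have e0 : (((x - 1).toNat : Nat) : Int) = x - 1 := by omega
    have e1 : row + d1 + (x - 1) * d1 = row + x * d1 := by ring
    have e2 : col + d2 + (x - 1) * d2 = col + x * d2 := by ring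
    constructor
    · have h := hbnd (x - 1).toNat (by omega)
      rw [e0, e1, e2] at h
      exact h
    · have h := hdot (x - 1).toNat (by omega)
      rw [e0, e1, e2] at h
      exact h

-- Converse: a clear, in-board segment from bishop to an in-board king makes A's walk succeed.
theorem walk_of_segment (board : List String) (size row col kr kc d1 d2 : Int) (m : Nat)
    (hm : 1 ≤ m) (hms : (m : Int) ≤ size)
    (hkr : kr = row + m * d1) (hkc : kc = col + m * d2)
    (hkin : 0 ≤ kr ∧ kr < size ∧ 0 ≤ kc ∧ kc < size)
    (hseg : ∀ x : Int, 1 ≤ x → x < m →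
        (0 ≤ row + x * d1 ∧ row + x * d1 < size ∧ 0 ≤ col + x * d2 ∧ col + x * d2 < size) ∧
        pvCell board (row + x * d1) (col + x * d2) = '.') :
    pvWalkA board size (kr, kc) d1 d2 (size.toNat + 1) (row + d1) (col + d2) = true := by
  rw [pvWalkA_iff]
  refine ⟨m - 1, by omega, ?_, ?_, ?_⟩
  · have e0 : ((m - 1 : Nat) : Int) = (m : Int) - 1 := by omega
    rw [e0, hkr, hkc]
    simp only [Prod.mk.injEq]
    constructor <;> ring
  · intro j hj
    have e1 : row + d1 + (j : Int) * d1 = row + ((j : Int) + 1) * d1 := by ring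
    have e2 : col + d2 + (j : Int) * d2 = col + ((j : Int) + 1) * d2 := by ring
    rw [e1, e2]
    by_cases hjm : (j : Int) + 1 < (m : Int)
    · exact (hseg ((j : Int) + 1) (by omega) hjm).1
    · have hm' : (j : Int) + 1 = (m : Int) := by omega
      rw [hm', ← hkr, ← hkc]
      exact hkin
  · intro j hj
    have e1 : row + d1 + (j : Int) * d1 = row + ((j : Int) + 1) * d1 := by ring
    have e2 : col + d2 + (j : Int) * d2 = col + ((j : Int) + 1) * d2 := by ring
    rw [e1, e2]
    exact (hseg ((j : Int) + 1) (by omega) (by omega)).2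

theorem bishopCaptures_spec : Claim_equal_bishopCaptures := by
  intro bishop king board _hdom _hpre
  obtain ⟨row, col⟩ := bishop
  obtain ⟨kr, kc⟩ := king
  unfold Spec_bishopCaptures
  rw [Bool.eq_iff_iff]
  simp only [bishopCaptures, bishopCaptures_alt, List.any_cons, List.any_nil, Bool.or_false,
    Bool.or_eq_true]
  by_cases hin : 0 ≤ kr ∧ kr < (board.length : Int) ∧ 0 ≤ kc ∧ kc < (board.length : Int)
  · rw [if_neg (not_not_intro hin)]
    by_cases heq : ((kr, kc) : Int × Int) = (row, col)
    · rw [if_pos heq]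
      simp only [Bool.false_eq_true, iff_false]
      simp only [Prod.mk.injEq] at heq
      rintro (h | h | h | h) <;>
        obtain ⟨m, hm1, hmr, hmc, -, -⟩ := walk_segment_of _ _ _ _ _ _ _ _ _ h <;>
        simp only [mul_one, mul_neg_one] at hmr hmc <;> omega
    · rw [if_neg heq]
      simp only [Prod.mk.injEq, not_and] at heq
      by_cases habs : (kr - row).natAbs = (kc - col).natAbs
      · rw [if_neg (not_not_intro habs)]
        have hne1 : kr ≠ row := by
          intro h; exact heq h (by omega)
        -- decompose B's step directions
        have hdr : ((if row < kr then (1 : Int) else -1) = 1 ∧ row < kr) ∨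
            ((if row < kr then (1 : Int) else -1) = -1 ∧ kr < row) := by
          split_ifs with h
          · exact Or.inl ⟨rfl, h⟩
          · exact Or.inr ⟨rfl, by omega⟩
        have hdc : ((if col < kc then (1 : Int) else -1) = 1 ∧ col < kc) ∨
            ((if col < kc then (1 : Int) else -1) = -1 ∧ kc < col) := by
          split_ifs with h
          · exact Or.inl ⟨rfl, h⟩
          · exact Or.inr ⟨rfl, by omega⟩
        simp only [List.all_eq_true, Bool.and_eq_true, decide_eq_true_eq, beq_iff_eq]
        constructor
        · rintro (h | h | h | h) <;>
            obtain ⟨m, hm1, hmr, hmc, -, hseg⟩ := walk_segment_of _ _ _ _ _ _ _ _ _ h <;>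
            simp only [mul_one, mul_neg_one] at hmr hmc hseg <;>
            intro x hx <;> rw [PySem.List.mem_pyRange_one] at hx <;>
            rcases hdr with ⟨hd1, hlt1⟩ | ⟨hd1, hlt1⟩ <;> rw [hd1] <;>
            rcases hdc with ⟨hd2, hlt2⟩ | ⟨hd2, hlt2⟩ <;> rw [hd2] <;>
            simp only [mul_one, mul_neg_one] <;>
            first
              | (exact absurd hlt1 (by omega))
              | (exact absurd hlt2 (by omega))
              | (exact hseg x (by omega) (by omega))
        · intro hall
          rcases hdr with ⟨hd1, hlt1⟩ | ⟨hd1, hlt1⟩ <;>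
            rcases hdc with ⟨hd2, hlt2⟩ | ⟨hd2, hlt2⟩ <;>
            rw [hd1, hd2] at hall
          -- (dr,dc) = (1,1): fourth direction
          · have hms : (((kr - row).natAbs : Nat) : Int) ≤ (board.length : Int) := by
              by_cases h2 : 2 ≤ ((kr - row).natAbs : Int)
              · have h1 := hall 1 (by rw [PySem.List.mem_pyRange_one]; omega)
                simp only [mul_one] at h1
                omega
              · omega
            refine Or.inr (Or.inr (Or.inr (walk_of_segment board _ row col kr kc 1 1
              (kr - row).natAbs (by omega) hms
              (by simp only [mul_one]; omega) (by simp only [mul_one]; omega) hin ?_)))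
            intro x h1 h2
            exact hall x (by rw [PySem.List.mem_pyRange_one]; omega)
          -- (dr,dc) = (1,-1): third direction
          · have hms : (((kr - row).natAbs : Nat) : Int) ≤ (board.length : Int) := by
              by_cases h2 : 2 ≤ ((kr - row).natAbs : Int)
              · have h1 := hall 1 (by rw [PySem.List.mem_pyRange_one]; omega)
                simp only [mul_one, mul_neg_one] at h1
                omega
              · omega
            refine Or.inr (Or.inr (Or.inl (walk_of_segment board _ row col kr kc 1 (-1)
              (kr - row).natAbs (by omega) hms
              (by simp only [mul_one]; omega) (by simp only [mul_neg_one]; omega) hin ?_)))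
            intro x h1 h2
            exact hall x (by rw [PySem.List.mem_pyRange_one]; omega)
          -- (dr,dc) = (-1,1): second direction
          · have hms : (((kr - row).natAbs : Nat) : Int) ≤ (board.length : Int) := by
              by_cases h2 : 2 ≤ ((kr - row).natAbs : Int)
              · have h1 := hall 1 (by rw [PySem.List.mem_pyRange_one]; omega)
                simp only [mul_one, mul_neg_one] at h1
                omega
              · omega
            refine Or.inr (Or.inl (walk_of_segment board _ row col kr kc (-1) 1
              (kr - row).natAbs (by omega) hms
              (by simp only [mul_neg_one]; omega) (by simp only [mul_one]; omega) hin ?_))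
            intro x h1 h2
            exact hall x (by rw [PySem.List.mem_pyRange_one]; omega)
          -- (dr,dc) = (-1,-1): first direction
          · have hms : (((kr - row).natAbs : Nat) : Int) ≤ (board.length : Int) := by
              by_cases h2 : 2 ≤ ((kr - row).natAbs : Int)
              · have h1 := hall 1 (by rw [PySem.List.mem_pyRange_one]; omega)
                simp only [mul_neg_one] at h1
                omega
              · omega
            refine Or.inl (walk_of_segment board _ row col kr kc (-1) (-1)
              (kr - row).natAbs (by omega) hms
              (by simp only [mul_neg_one]; omega) (by simp only [mul_neg_one]; omega) hin ?_)
            intro x h1 h2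
            exact hall x (by rw [PySem.List.mem_pyRange_one]; omega)
      · rw [if_pos habs]
        simp only [Bool.false_eq_true, iff_false]
        rintro (h | h | h | h) <;>
          obtain ⟨m, hm1, hmr, hmc, -, -⟩ := walk_segment_of _ _ _ _ _ _ _ _ _ h <;>
          simp only [mul_one, mul_neg_one] at hmr hmc <;> omega
  · rw [if_pos hin]
    simp only [Bool.false_eq_true, iff_false]
    rintro (h | h | h | h) <;>
      obtain ⟨m, hm1, hmr, hmc, hkin, -⟩ := walk_segment_of _ _ _ _ _ _ _ _ _ h <;>
      exact hin hkin
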